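-- pv_equiv track=rewrite | github.com/Exxx1le/_algorithms_ | Урок 1. Практическое задание/task_3.py | find_top3
-- ===== SOURCE A (Python) =====
-- def find_top3(dictionary):  # O(N log N)
--
--     income = []  # O(1)
--
--     for val in dictionary.values():  # O(N)
--         income.append(val)  # O(1)
--
--     top_list = sorted(income, reverse=True)[0:3]  # O(N log N)
--
--     top_dict = {}  # O(1)
--
--     for k, v in dictionary.items():  # O(N^2)
--         for i in top_list:  # O(N)
--             if v == i:
--                 top_dict.setdefault(k, v)  # O(1)
--
--     return (top_dict)  # O(1)
-- ===== SOURCE B (Python) =====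
-- def find_top3(dictionary):
--     first = second = third = None
--     n = 0
--     for v in dictionary.values():
--         n += 1
--         if first is None or v > first:
--             first, second, third = v, first, second
--         elif second is None or v > second:
--             second, third = v, second
--         elif third is None or v > third:
--             third = v
--     if n < 3:
--         return dict(dictionary)
--     return {k: v for k, v in dictionary.items() if v >= third}
-- ===== Notes on version B (the rewrite author's own statement) =====
-- stated objective: alternative
-- what changed: B removes the sort entirely: one pass maintains three scalar running maxima (first/second/third) with cascading comparisons, then a single comprehension keeps entries with v >= third; A sorts all values, slices the top 3 and runs a nested membership loop with setdefault.
import Mathlib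
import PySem

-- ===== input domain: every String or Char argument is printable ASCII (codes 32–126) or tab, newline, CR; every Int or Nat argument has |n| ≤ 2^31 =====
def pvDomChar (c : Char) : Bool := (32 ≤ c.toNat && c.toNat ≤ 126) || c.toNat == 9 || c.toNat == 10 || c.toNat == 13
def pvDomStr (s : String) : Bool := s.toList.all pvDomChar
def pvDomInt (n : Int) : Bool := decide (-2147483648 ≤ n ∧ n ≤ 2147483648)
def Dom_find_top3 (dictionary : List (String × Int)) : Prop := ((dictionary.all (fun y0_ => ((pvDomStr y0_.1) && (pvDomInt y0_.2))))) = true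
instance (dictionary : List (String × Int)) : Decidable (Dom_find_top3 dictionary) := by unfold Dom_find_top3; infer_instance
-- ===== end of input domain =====

-- B removes A's sort + top-3 slice + nested membership loop: one pass maintains three scalar
-- running maxima (first/second/third) by cascading comparisons, then one filter pass keeps
-- the entries with value >= third (an alternative, sort-free decomposition).


-- ===== PORT A =====
def find_top3 (dictionary : List (String × Int)) : List (String × Int) :=
  -- income = []; for val in dictionary.values(): income.append(val)
  let income : List Int := dictionary.foldl (fun acc p => acc ++ [p.2]) []
  -- top_list = sorted(income, reverse=True)[0:3]
  let top_list : List Int :=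
    PySem.List.slice (PySem.List.sorted income (fun x => x) true) (some 0) (some 3)
  -- top_dict = {}; for k, v in dictionary.items(): for i in top_list: if v == i: top_dict.setdefault(k, v)
  let top_dict : PySem.Dict String Int :=
    dictionary.foldl
      (fun d p =>
        top_list.foldl (fun d i => if p.2 == i then PySem.Dict.setdefault d p.1 p.2 else d) d)
      PySem.Dict.empty
  top_dict.items

-- ===== PORT B =====
def find_top3_alt (dictionary : List (String × Int)) : List (String × Int) :=
  -- first = second = third = None; n = 0
  -- for v in dictionary.values(): n += 1; cascading update of (first, second, third)
  let st :=
    dictionary.foldl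
      (fun (s : (Option Int × Option Int × Option Int) × Int) p =>
        let n := s.2 + 1
        if s.1.1.elim true (fun a => decide (a < p.2)) then ((some p.2, s.1.1, s.1.2.1), n)
        else if s.1.2.1.elim true (fun a => decide (a < p.2)) then ((s.1.1, some p.2, s.1.2.1), n)
        else if s.1.2.2.elim true (fun a => decide (a < p.2)) then ((s.1.1, s.1.2.1, some p.2), n)
        else (s.1, n))
      ((none, none, none), 0)
  -- if n < 3: return dict(dictionary)
  if st.2 < 3 then dictionary
  else
    -- return {k: v for k, v in dictionary.items() if v >= third}; third is set since n >= 3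
    match st.1.2.2 with
    | some t => dictionary.filter (fun p => decide (t ≤ p.2))
    | none => []

-- ===== PRECONDITION & SPEC =====
-- Pre_ excludes association lists with duplicate keys: they do not encode any Python dict
-- (a dict collapses duplicate keys before either function runs), so the ports' behaviour
-- there corresponds to no Python input.
def Pre_find_top3 (dictionary : List (String × Int)) : Prop :=
  (dictionary.map Prod.fst).Nodup
instance (dictionary : List (String × Int)) : Decidable (Pre_find_top3 dictionary) := by
  unfold Pre_find_top3; infer_instance

def pvWitness_find_top3 : (List (String × Int)) :=
  [("a", 5), ("b", 2), ("c", 7), ("d", 2)]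

def Spec_find_top3 (dictionary : List (String × Int)) (out : List (String × Int)) : Prop := out = find_top3_alt dictionary
instance (dictionary : List (String × Int)) (out : List (String × Int)) : Decidable (Spec_find_top3 dictionary out) := by unfold Spec_find_top3; infer_instance

-- ===== CLAIM (what is proved, stated in full; the proofs are below) =====
def Claim_equal_find_top3 : Prop := ∀ (dictionary : List (String × Int)), Dom_find_top3 dictionary → Pre_find_top3 dictionary → Spec_find_top3 dictionary (find_top3 dictionary)

-- ===== LEMMAS AND PROOFS =====

-- A's inner loop over top_list: setdefault fires (at most once) iff v occurs in top_list
lemma inner_fold_eq (top : List Int) (d : PySem.Dict String Int) (k : String) (v : Int) :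
    top.foldl (fun d i => if v == i then PySem.Dict.setdefault d k v else d) d
      = if v ∈ top then PySem.Dict.setdefault d k v else d := by
  induction top generalizing d with
  | nil => simp
  | cons i t ih =>
    rw [List.foldl_cons]
    by_cases h : v = i
    · subst h
      rw [if_pos (by simp : ((v : Int) == v) = true), ih, if_pos (List.mem_cons_self)]
      split_ifs with hm
      · exact PySem.Dict.setdefault_of_contains _ _ (by simp [PySem.Dict.contains_setdefault])
      · rfl
    · rw [if_neg (by simp [h] : ¬ ((v == i) = true)), ih]
      simp [List.mem_cons, h]

-- A's outer loop over fresh, pairwise-distinct keys builds exactly the filtered item list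
lemma outer_fold_items (top : List Int) :
    ∀ (l : List (String × Int)) (d : PySem.Dict String Int),
      (l.map Prod.fst).Nodup → (∀ p ∈ l, d.contains p.1 = false) →
      (l.foldl (fun d p => if p.2 ∈ top then PySem.Dict.setdefault d p.1 p.2 else d) d).items
        = d.items ++ l.filter (fun p => decide (p.2 ∈ top)) := by
  intro l
  induction l with
  | nil => intro d _ _; simp
  | cons p t ih =>
    intro d hnd hfresh
    have hpf : d.contains p.1 = false := hfresh p (List.mem_cons_self)
    rw [List.map_cons] at hnd
    have hnd' : (t.map Prod.fst).Nodup := (List.nodup_cons.mp hnd).2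
    have hne : ∀ q ∈ t, q.1 ≠ p.1 := by
      intro q hq he
      exact (List.nodup_cons.mp hnd).1 (he ▸ List.mem_map_of_mem hq)
    simp only [List.foldl_cons]
    by_cases hm : p.2 ∈ top
    · rw [if_pos hm, PySem.Dict.setdefault_of_not_contains d p.2 hpf,
        ih _ hnd' (by intro q hq; rw [PySem.Dict.contains_insert]; simp [hne q hq, hfresh q (List.mem_cons_of_mem _ hq)]),
        PySem.Dict.items_insert_of_not_contains d p.2 hpf]
      simp [hm]
    · rw [if_neg hm, ih _ hnd' (fun q hq => hfresh q (List.mem_cons_of_mem _ hq))]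
      simp [hm]

-- in a descending list of length ≥ 3, membership in the first three = being ≥ the third element
lemma take3_mem_iff (s : List Int) (hp : s.Pairwise (fun a b => b ≤ a)) (h3 : 3 ≤ s.length)
    (v : Int) (hv : v ∈ s) : v ∈ s.take 3 ↔ s[2]'(by omega) ≤ v := by
  have hg := (List.pairwise_iff_getElem).mp hp
  constructor
  · intro hm
    obtain ⟨i, hi, he⟩ := List.mem_iff_getElem.mp hm
    have hlt : i < min 3 s.length := by simpa using hi
    have his : i < s.length := lt_of_lt_of_le hlt (min_le_right _ _)
    rw [List.getElem_take] at he
    rcases lt_or_ge i 2 with h | h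
    · exact he ▸ hg i 2 his (by omega) h
    · have h2 : i = 2 := by omega
      subst h2
      exact le_of_eq he
  · intro hle
    obtain ⟨j, hj, he⟩ := List.mem_iff_getElem.mp hv
    by_cases hj3 : j < 3
    · subst he
      have : (s.take 3)[j]'(by simp; omega) = s[j] := List.getElem_take
      exact this ▸ List.getElem_mem _
    · have h1 : s[j] ≤ s[2]'(by omega) := hg 2 j (by omega) hj (by omega)
      have h2 : v = s[2]'(by omega) := le_antisymm (he ▸ h1) hle
      have : (s.take 3)[2]'(by simp; omega) = s[2]'(by omega) := List.getElem_take
      rw [h2, ← this]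
      exact List.getElem_mem _

-- B's loop body, on the running triple only (the n component is split off separately)
def step3 (s : Option Int × Option Int × Option Int) (v : Int) :
    Option Int × Option Int × Option Int :=
  if s.1.elim true (fun a => decide (a < v)) then (some v, s.1, s.2.1)
  else if s.2.1.elim true (fun a => decide (a < v)) then (s.1, some v, s.2.1)
  else if s.2.2.elim true (fun a => decide (a < v)) then (s.1, s.2.1, some v)
  else s

-- ordered insertion into a descending list (after equal elements)
def insD (v : Int) : List Int → List Int
  | [] => [v]
  | a :: t => if a < v then v :: a :: t else a :: insD v t

lemma perm_insD (v : Int) (l : List Int) : (insD v l).Perm (v :: l) := by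
  induction l with
  | nil => simp [insD]
  | cons a t ih =>
    simp only [insD]
    split_ifs
    · exact List.Perm.refl _
    · exact (ih.cons a).trans (List.Perm.swap v a t)

lemma mem_insD (x v : Int) (l : List Int) : x ∈ insD v l ↔ x = v ∨ x ∈ l := by
  rw [(perm_insD v l).mem_iff]; simp

lemma pairwise_insD (v : Int) (l : List Int) (hp : l.Pairwise (fun a b => b ≤ a)) :
    (insD v l).Pairwise (fun a b => b ≤ a) := by
  induction l with
  | nil => simp [insD]
  | cons a t ih =>
    rw [List.pairwise_cons] at hp
    simp only [insD]
    split_ifs with h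
    · exact List.pairwise_cons.mpr ⟨by
        intro b hb
        rcases List.mem_cons.mp hb with hb | hb
        · omega
        · have := hp.1 b hb; omega,
        List.pairwise_cons.mpr hp⟩
    · refine List.pairwise_cons.mpr ⟨?_, ih hp.2⟩
      intro b hb
      rcases (mem_insD b v t).mp hb with hb | hb
      · omega
      · exact hp.1 b hb

-- B's step applied to the first three elements of a descending list = first three after insertion
lemma step3_insD (l : List Int) (hp : l.Pairwise (fun a b => b ≤ a)) (v : Int) :
    step3 (l[0]?, l[1]?, l[2]?) v = ((insD v l)[0]?, (insD v l)[1]?, (insD v l)[2]?) := by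
  match l, hp with
  | [], _ => simp [step3, insD]
  | [a], _ =>
    simp only [step3, insD]
    by_cases h : a < v <;> simp [h]
  | [a, b], hp =>
    have hba : b ≤ a := by
      rw [List.pairwise_cons] at hp; exact hp.1 b (List.mem_cons_self)
    simp only [step3, insD]
    by_cases h1 : a < v
    · simp [h1]
    · by_cases h2 : b < v <;> simp [h1, h2]
  | a :: b :: c :: r, hp =>
    have hba : b ≤ a := by
      rw [List.pairwise_cons] at hp; exact hp.1 b (by simp)
    have hcb : c ≤ b := by
      rw [List.pairwise_cons, List.pairwise_cons] at hp; exact hp.2.1 c (by simp)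
    simp only [step3, insD]
    by_cases h1 : a < v
    · simp [h1]
    · by_cases h2 : b < v
      · simp [h1, h2]
      · by_cases h3 : c < v <;> simp [h1, h2, h3]

-- sorting (descending) after appending one value = ordered insertion into the sorted list
lemma sortedDesc_append_single (p : List Int) (v : Int) :
    PySem.List.sorted (p ++ [v]) (fun x => x) true
      = insD v (PySem.List.sorted p (fun x => x) true) := by
  have hperm : (PySem.List.sorted (p ++ [v]) (fun x => x) true).Perm
      (insD v (PySem.List.sorted p (fun x => x) true)) := by
    refine (PySem.List.sorted_perm _ _ _).trans (List.Perm.trans ?_ (perm_insD v _).symm)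
    exact ((List.perm_append_comm).trans
      (((PySem.List.sorted_perm p (fun x => x) true).symm).cons v))
  have hp1 : (PySem.List.sorted (p ++ [v]) (fun x => x) true).Pairwise (fun a b => b ≤ a) :=
    PySem.List.sorted_pairwise_rev _ _
  have hp2 : (insD v (PySem.List.sorted p (fun x => x) true)).Pairwise (fun a b => b ≤ a) :=
    pairwise_insD v _ (PySem.List.sorted_pairwise_rev _ _)
  -- two descending lists that are permutations of each other are equal: pass to reverses
  have hrev := PySem.List.eq_of_perm_of_pairwise_le_of_injective (fun x : Int => x)
    (fun _ _ h => h)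
    ((List.reverse_perm _).trans (hperm.trans (List.reverse_perm _).symm))
    (by rw [List.pairwise_reverse]; exact hp1)
    (by rw [List.pairwise_reverse]; exact hp2)
  exact List.reverse_injective hrev

-- folding B's step over a value list yields the first three elements of the descending sort
lemma fold_step3 (p : List Int) :
    p.foldl step3 (none, none, none)
      = ((PySem.List.sorted p (fun x => x) true)[0]?,
         (PySem.List.sorted p (fun x => x) true)[1]?,
         (PySem.List.sorted p (fun x => x) true)[2]?) := by
  induction p using List.reverseRecOn with
  | nil => simp [PySem.List.sorted]
  | append_singleton q v ih =>
    rw [List.foldl_append, List.foldl_cons, List.foldl_nil, ih,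
      step3_insD _ (PySem.List.sorted_pairwise_rev _ _) v, sortedDesc_append_single]

-- B's combined fold (triple and counter) splits into step3 over the values and the length
lemma fold_split (l : List (String × Int)) :
    ∀ (st0 : Option Int × Option Int × Option Int) (n0 : Int),
    l.foldl
      (fun (s : (Option Int × Option Int × Option Int) × Int) p =>
        let n := s.2 + 1
        if s.1.1.elim true (fun a => decide (a < p.2)) then ((some p.2, s.1.1, s.1.2.1), n)
        else if s.1.2.1.elim true (fun a => decide (a < p.2)) then ((s.1.1, some p.2, s.1.2.1), n)
        else if s.1.2.2.elim true (fun a => decide (a < p.2)) then ((s.1.1, s.1.2.1, some p.2), n)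
        else (s.1, n))
      (st0, n0)
      = ((l.map Prod.snd).foldl step3 st0, n0 + l.length) := by
  intro st0 n0
  have hf : (fun (s : (Option Int × Option Int × Option Int) × Int) (p : String × Int) =>
        let n := s.2 + 1
        if s.1.1.elim true (fun a => decide (a < p.2)) then ((some p.2, s.1.1, s.1.2.1), n)
        else if s.1.2.1.elim true (fun a => decide (a < p.2)) then ((s.1.1, some p.2, s.1.2.1), n)
        else if s.1.2.2.elim true (fun a => decide (a < p.2)) then ((s.1.1, s.1.2.1, some p.2), n)
        else (s.1, n))
      = (fun (s : (Option Int × Option Int × Option Int) × Int) (p : String × Int) =>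
          (step3 s.1 p.2, s.2 + 1)) := by
    funext s p
    simp only [step3]
    split_ifs <;> rfl
  rw [hf]
  induction l generalizing st0 n0 with
  | nil => simp
  | cons p t ih =>
    rw [List.foldl_cons, List.map_cons, List.foldl_cons, ih]
    refine Prod.ext rfl ?_
    simp
    omega

-- the whole equivalence, on duplicate-free key lists
lemma find_top3_eq_alt (l : List (String × Int)) (hpre : (l.map Prod.fst).Nodup) :
    find_top3 l = find_top3_alt l := by
  simp only [find_top3, find_top3_alt, PySem.List.foldl_append_singleton_eq_map, List.nil_append]
  have hslice : ∀ s : List Int, PySem.List.slice s (some 0) (some 3) = s.take 3 := by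
    intro s; simp [pysem]
  rw [hslice]
  rw [PySem.List.foldl_congr_mem l _
    (fun d p => if p.2 ∈ (PySem.List.sorted (l.map Prod.snd) (fun x => x) true).take 3
      then PySem.Dict.setdefault d p.1 p.2 else d)
    PySem.Dict.empty
    (fun d p _ => inner_fold_eq _ d p.1 p.2)]
  rw [outer_fold_items _ l PySem.Dict.empty hpre (by intro p _; rfl)]
  rw [show (PySem.Dict.empty : PySem.Dict String Int).items = [] from rfl, List.nil_append]
  rw [fold_split l (none, none, none) 0]
  have hlens : (PySem.List.sorted (l.map Prod.snd) (fun x => x) true).length = l.length := by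
    rw [PySem.List.length_sorted, List.length_map]
  by_cases hsmall : l.length < 3
  · rw [if_pos (by simp; omega)]
    have htop : (PySem.List.sorted (l.map Prod.snd) (fun x => x) true).take 3
        = PySem.List.sorted (l.map Prod.snd) (fun x => x) true :=
      List.take_of_length_le (by omega)
    rw [htop]
    rw [List.filter_eq_self.mpr ?_]
    intro p hp
    simp only [decide_eq_true_eq, PySem.List.mem_sorted]
    exact List.mem_map_of_mem hp
  · rw [if_neg (by simp; omega)]
    have h3 : 3 ≤ (PySem.List.sorted (l.map Prod.snd) (fun x => x) true).length := by omega
    rw [fold_step3 (l.map Prod.snd)]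
    have hget : (PySem.List.sorted (l.map Prod.snd) (fun x => x) true)[2]?
        = some ((PySem.List.sorted (l.map Prod.snd) (fun x => x) true)[2]'(by omega)) :=
      List.getElem?_eq_getElem (by omega)
    show List.filter _ l = (match (PySem.List.sorted (l.map Prod.snd) (fun x => x) true)[2]? with
      | some t => l.filter (fun p => decide (t ≤ p.2))
      | none => [])
    rw [hget]
    apply List.filter_congr
    intro p hp
    have hmem : p.2 ∈ PySem.List.sorted (l.map Prod.snd) (fun x => x) true := by
      rw [PySem.List.mem_sorted]; exact List.mem_map_of_mem hp
    have hiff := take3_mem_iff _ (PySem.List.sorted_pairwise_rev (l.map Prod.snd) (fun x => x))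
      (by omega) p.2 hmem
    exact decide_eq_decide.mpr hiff

-- ===== VERDICT (by name: the statement is the Claim_ definition above) =====
theorem find_top3_spec : Claim_equal_find_top3 := by
  intro dictionary _ hpre
  unfold Spec_find_top3
  exact find_top3_eq_alt dictionary hpre
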